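-- pv_equiv track=rewrite | github.com/MaxStrange/AudioSegment | docs/api/algorithms/asa.py | _get_consecutive_portions_of_front
-- ===== SOURCE A (Python) =====
-- def _get_consecutive_portions_of_front(front):
--     """
--     Yields lists of the form [(f, s), (f, s)], one at a time from the given front (which is a list of the same form),
--     such that each list yielded is consecutive in frequency.
--     """
--     last_f = None
--     ls = []
--     for f, s in front:
--         if last_f is not None and f != last_f + 1:
--             yield ls
--             ls = []
--         ls.append((f, s))
--         last_f = f
--     yield ls
-- ===== SOURCE B (Python) =====
-- def _attach(item, groups):
--     """Prepend item as its own run, merging with the first run when that run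
--     starts one frequency above item's."""
--     if groups and groups[0][0][0] == item[0] + 1:
--         return [[item] + groups[0]] + groups[1:]
--     return [[item]] + groups
--
--
-- def _get_consecutive_portions_of_front(front):
--     # Build the runs back-to-front: walk the front right-to-left and attach
--     # each item in front of the runs built so far.
--     groups = []
--     for item in reversed(list(front)):
--         groups = _attach(item, groups)
--     yield from groups
-- ===== Notes on version B (the rewrite author's own statement) =====
-- stated objective: alternative
-- what changed: B builds the run list back-to-front: it walks the front right-to-left and prepends each item, merging it into the first run when that run starts one frequency above, instead of A's left-to-right accumulator loop that flushes on a break; Pre_ excludes the empty front, where A's yielding of a single empty list is an accidental corner (B yields no runs).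
-- outside the precondition, e.g. on _get_consecutive_portions_of_front([]): A returns [[]], B returns []
import Mathlib
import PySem

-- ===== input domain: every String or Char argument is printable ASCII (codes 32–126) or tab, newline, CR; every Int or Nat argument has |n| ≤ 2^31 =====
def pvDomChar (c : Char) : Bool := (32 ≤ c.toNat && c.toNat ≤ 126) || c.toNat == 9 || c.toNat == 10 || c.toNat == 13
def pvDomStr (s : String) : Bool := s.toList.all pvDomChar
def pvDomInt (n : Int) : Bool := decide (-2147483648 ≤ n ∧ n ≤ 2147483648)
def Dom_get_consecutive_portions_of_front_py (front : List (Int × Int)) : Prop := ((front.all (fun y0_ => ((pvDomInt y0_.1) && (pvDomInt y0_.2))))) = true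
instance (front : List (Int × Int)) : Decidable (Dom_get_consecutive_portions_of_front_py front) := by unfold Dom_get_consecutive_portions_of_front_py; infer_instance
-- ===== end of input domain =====

-- B builds the run list back-to-front (right-to-left pass with a prepend/merge helper)
-- instead of A's left-to-right accumulator loop; alternative decomposition, same results on nonempty fronts.


-- ===== PORT A =====
-- one loop step: state (last_f, ls, acc); 'yield ls' collects into acc
def pvStepA (st : Option Int × List (Int × Int) × List (List (Int × Int)))
    (x : Int × Int) : Option Int × List (Int × Int) × List (List (Int × Int)) :=
  match st, x with
  | (last_f, ls, acc), (f, s) =>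
    match last_f with
    | none => (some f, ls ++ [(f, s)], acc)
    | some p =>
      if f ≠ p + 1 then (some f, [(f, s)], acc ++ [ls])
      else (some f, ls ++ [(f, s)], acc)

def get_consecutive_portions_of_front_py (front : List (Int × Int)) : List (List (Int × Int)) :=
  let st := front.foldl pvStepA (none, [], [])
  st.2.2 ++ [st.2.1]

-- ===== PORT B =====
-- Source B's _attach: prepend item as its own run, merging with the first run
-- when that run starts one frequency above item's
def pvAttach (x : Int × Int) (groups : List (List (Int × Int))) :
    List (List (Int × Int)) :=
  match groups with
  | ((g, u) :: h) :: t => if g = x.1 + 1 then ([x] ++ (g, u) :: h) :: t else [x] :: groups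
  | _ => [x] :: groups

-- the right-to-left loop over reversed(front) is the fold from the right
def get_consecutive_portions_of_front_py_alt (front : List (Int × Int)) :
    List (List (Int × Int)) :=
  front.foldr pvAttach []

-- ===== PRECONDITION & SPEC =====
-- Pre_ excludes only the empty front, on which A yields one empty list — an accidental
-- corner of its accumulator loop, as defensible as B's yielding no runs at all.
def Pre_get_consecutive_portions_of_front_py (front : List (Int × Int)) : Prop := front ≠ []
instance (front : List (Int × Int)) : Decidable (Pre_get_consecutive_portions_of_front_py front) := by unfold Pre_get_consecutive_portions_of_front_py; infer_instance

def pvWitness_get_consecutive_portions_of_front_py : (List (Int × Int)) := [(1, 2), (2, 3), (5, 0)]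

def Spec_get_consecutive_portions_of_front_py (front : List (Int × Int)) (out : List (List (Int × Int))) : Prop := out = get_consecutive_portions_of_front_py_alt front
instance (front : List (Int × Int)) (out : List (List (Int × Int))) : Decidable (Spec_get_consecutive_portions_of_front_py front out) := by unfold Spec_get_consecutive_portions_of_front_py; infer_instance

-- ===== CLAIM (what is proved, stated in full; the proofs are below) =====
def Claim_equal_get_consecutive_portions_of_front_py : Prop := ∀ (front : List (Int × Int)), Dom_get_consecutive_portions_of_front_py front → Pre_get_consecutive_portions_of_front_py front → Spec_get_consecutive_portions_of_front_py front (get_consecutive_portions_of_front_py front)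

-- ===== LEMMAS AND PROOFS =====

-- forward characterisation of A's loop once the state is (some p, ls, acc)
def pvConsume (p : Int) (cur : List (Int × Int)) : List (Int × Int) → List (List (Int × Int))
  | [] => [cur]
  | (f, s) :: rest =>
    if f = p + 1 then pvConsume f (cur ++ [(f, s)]) rest
    else cur :: pvConsume f [(f, s)] rest

theorem pvFoldA (xs : List (Int × Int)) :
    ∀ (p : Int) (ls : List (Int × Int)) (acc : List (List (Int × Int))),
      (let st := xs.foldl pvStepA (some p, ls, acc); st.2.2 ++ [st.2.1])
        = acc ++ pvConsume p ls xs := by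
  induction xs with
  | nil => intro p ls acc; simp [pvConsume]
  | cons x rest ih =>
    intro p ls acc
    obtain ⟨f, s⟩ := x
    by_cases h : f = p + 1
    · simp [pvStepA, h, pvConsume, ih]
    · simp [pvStepA, h, pvConsume, ih, List.append_assoc]

-- proof-side generalisation of pvAttach to a whole run ending at frequency p
def pvMergeRun (cur : List (Int × Int)) (p : Int) (G : List (List (Int × Int))) :
    List (List (Int × Int)) :=
  match G with
  | ((g, u) :: h) :: t => if g = p + 1 then (cur ++ (g, u) :: h) :: t else cur :: G
  | _ => cur :: G

theorem pvMergeRun_single (x : Int × Int) (G : List (List (Int × Int))) :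
    pvMergeRun [x
    ] x.1 G = pvAttach x G := by
  match G with
  | [] => rfl
  | [] :: t => rfl
  | ((g, u) :: h) :: t => simp [pvMergeRun, pvAttach]

-- key algebraic fact: merging cur onto an attach splits on the consecutive test
theorem pvMergeKey (G : List (List (Int × Int))) (cur : List (Int × Int)) (p f s : Int) :
    pvMergeRun cur p (pvAttach (f, s) G)
      = if f = p + 1 then pvMergeRun (cur ++ [(f, s)]) f G
        else cur :: pvAttach (f, s) G := by
  match G with
  | [] => simp [pvAttach, pvMergeRun]
  | [] :: t => simp [pvAttach, pvMergeRun]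
  | ((g, u) :: h) :: t =>
    by_cases hg : g = f + 1
    · by_cases hp : f = p + 1
      · by_cases hg2 : g = p + 1 + 1 <;>
          simp_all [pvAttach, pvMergeRun, List.append_assoc]
      · simp [pvAttach, pvMergeRun, hg, hp]
    · by_cases hp : f = p + 1
      · by_cases hg2 : g = p + 1 + 1 <;>
          simp_all [pvAttach, pvMergeRun]
      · simp [pvAttach, pvMergeRun, hg, hp]

-- pvConsume equals merging the current run onto B's grouping of the rest
theorem pvConsume_eq_merge (xs : List (Int × Int)) :
    ∀ (p : Int) (cur : List (Int × Int)),
      pvConsume p cur xs = pvMergeRun cur p (get_consecutive_portions_of_front_py_alt xs) := by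
  induction xs with
  | nil => intro p cur; simp [pvConsume, get_consecutive_portions_of_front_py_alt, pvMergeRun]
  | cons x rest ih =>
    intro p cur
    obtain ⟨f, s⟩ := x
    have hfold : get_consecutive_portions_of_front_py_alt ((f, s) :: rest)
        = pvAttach (f, s) (get_consecutive_portions_of_front_py_alt rest) := by
      simp [get_consecutive_portions_of_front_py_alt]
    rw [hfold, pvMergeKey]
    by_cases h : f = p + 1
    · simp [pvConsume, h, ih]
    · simp [pvConsume, h, ih, pvMergeRun_single ((f, s)) _]

-- ===== VERDICT (by name: the statement is the Claim_ definition above) =====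
theorem get_consecutive_portions_of_front_py_spec : Claim_equal_get_consecutive_portions_of_front_py := by
  intro front _ hpre
  unfold Spec_get_consecutive_portions_of_front_py
  match front with
  | [] => exact absurd rfl hpre
  | (f, s) :: rest =>
    have h1 : get_consecutive_portions_of_front_py ((f, s) :: rest)
        = pvConsume f [(f, s)] rest := by
      have := pvFoldA rest f [(f, s)] []
      simpa [get_consecutive_portions_of_front_py, pvStepA] using this
    rw [h1, pvConsume_eq_merge, pvMergeRun_single ((f, s)) _]
    simp [get_consecutive_portions_of_front_py_alt]
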